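-- pv_equiv track=rewrite | github.com/SurinSeong/algorithm | solving-club/1926.py | find_369
-- ===== SOURCE A (Python) =====
-- def find_369(n):
--     cnt = 0
--     while (n // 10) != 0:
--
--         if (n % 10) in [3, 6, 9]:
--             cnt += 1
--
--         n //= 10
--
--     if n in [3, 6, 9]:
--         cnt += 1
--
--     return cnt
-- ===== SOURCE B (Python) =====
-- def find_369(n):
--     return sum(1 for c in str(n) if c in '369')
-- ===== Notes on version B (the rewrite author's own statement) =====
-- stated objective: simpler
-- what changed: Replaces the arithmetic digit-peeling while loop (repeated % 10 / //= 10 with a separate final-digit check) by a single pass over the decimal string representation counting characters in '369'.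
import Mathlib
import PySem

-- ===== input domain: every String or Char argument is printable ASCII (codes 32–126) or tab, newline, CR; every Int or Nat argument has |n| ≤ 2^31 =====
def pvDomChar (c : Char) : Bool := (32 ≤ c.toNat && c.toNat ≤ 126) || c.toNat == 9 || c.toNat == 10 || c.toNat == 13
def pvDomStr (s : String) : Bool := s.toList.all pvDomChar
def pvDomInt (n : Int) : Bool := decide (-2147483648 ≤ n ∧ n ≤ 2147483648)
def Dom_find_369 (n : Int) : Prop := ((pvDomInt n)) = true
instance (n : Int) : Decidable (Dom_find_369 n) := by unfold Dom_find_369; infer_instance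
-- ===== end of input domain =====

-- B replaces A's arithmetic digit-peeling while loop by counting characters of str(n) in '369' (simpler, same cost).
-- Pre_ excludes negative n, on which A's while loop never terminates (repeated floor division gets stuck at minus one).


-- ===== PORT A =====
-- fuel-bounded transliteration of A's while loop; fuel n.natAbs is enough for every n ≥ 0 (the only n on which the Python loop terminates)
def find369Loop (f : Nat) (n cnt : Int) : Int :=
  if PySem.Int.floordiv n 10 ≠ 0 then
    match f with
    | 0 => cnt
    | Nat.succ f' =>
        find369Loop f' (PySem.Int.floordiv n 10)
          (if PySem.Int.mod n 10 = 3 ∨ PySem.Int.mod n 10 = 6 ∨ PySem.Int.mod n 10 = 9 then cnt + 1 else cnt)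
  else
    if n = 3 ∨ n = 6 ∨ n = 9 then cnt + 1 else cnt

def find_369 (n : Int) : Int := find369Loop n.natAbs n 0

-- ===== PORT B =====
def find_369_alt (n : Int) : Int :=
  (((PySem.Int.toStr n).toList.filter (fun c => c == '3' || c == '6' || c == '9')).length : Int)

-- ===== PRECONDITION & SPEC =====
-- A's while loop diverges for negative n (repeated floor division gets stuck at minus one), so only nonnegative n are claimed
def Pre_find_369 (n : Int) : Prop := 0 ≤ n
instance (n : Int) : Decidable (Pre_find_369 n) := by unfold Pre_find_369; infer_instance
def pvWitness_find_369 : Int := (369)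

def Spec_find_369 (n : Int) (out : Int) : Prop := out = find_369_alt n
instance (n : Int) (out : Int) : Decidable (Spec_find_369 n out) := by unfold Spec_find_369; infer_instance

-- ===== CLAIM (what is proved, stated in full; the proofs are below) =====
def Claim_equal_find_369 : Prop := ∀ (n : Int), Dom_find_369 n → Pre_find_369 n → Spec_find_369 n (find_369 n)

-- ===== LEMMAS AND PROOFS =====

-- reference digit count, used by both directions of the proof
def g369 (m : Nat) : Nat :=
  if h : m / 10 = 0 then (if m = 3 ∨ m = 6 ∨ m = 9 then 1 else 0)
  else (if m % 10 = 3 ∨ m % 10 = 6 ∨ m % 10 = 9 then 1 else 0) + g369 (m / 10)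
termination_by m
decreasing_by omega

lemma digitChar_369 (r : Nat) (h : r < 10) :
    ((Nat.digitChar r == '3' || Nat.digitChar r == '6' || Nat.digitChar r == '9') = true)
      ↔ (r = 3 ∨ r = 6 ∨ r = 9) := by
  interval_cases r <;> decide

lemma countP_toDigitsCore :
    ∀ (f m : Nat) (ds : List Char), m < f →
      (Nat.toDigitsCore 10 f m ds).countP (fun c => c == '3' || c == '6' || c == '9')
        = g369 m + ds.countP (fun c => c == '3' || c == '6' || c == '9') := by
  intro f
  induction f with
  | zero => omega
  | succ f ih =>
    intro m ds h
    simp only [Nat.toDigitsCore]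
    by_cases h10 : m / 10 = 0
    · have hm : m < 10 := by omega
      have hmm : m % 10 = m := by omega
      rw [if_pos h10, hmm, g369, dif_pos h10, List.countP_cons]
      by_cases hc : m = 3 ∨ m = 6 ∨ m = 9
      · rw [if_pos ((digitChar_369 m hm).2 hc), if_pos hc]; omega
      · rw [if_neg (fun hh => hc ((digitChar_369 m hm).1 hh)), if_neg hc]; omega
    · rw [if_neg h10]
      have hlt : m / 10 < f := by omega
      rw [ih (m / 10) _ hlt]
      have hg : g369 m = (if m % 10 = 3 ∨ m % 10 = 6 ∨ m % 10 = 9 then 1 else 0) + g369 (m / 10) := by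
        conv_lhs => rw [g369]
        rw [dif_neg h10]
      rw [hg, List.countP_cons]
      by_cases hc : m % 10 = 3 ∨ m % 10 = 6 ∨ m % 10 = 9
      · rw [if_pos ((digitChar_369 (m % 10) (by omega)).2 hc), if_pos hc]; omega
      · rw [if_neg (fun hh => hc ((digitChar_369 (m % 10) (by omega)).1 hh)), if_neg hc]; omega

lemma fdiv_cast (m : Nat) : PySem.Int.floordiv (m : Int) 10 = ((m / 10 : Nat) : Int) := by
  simp [PySem.Int.floordiv, Int.fdiv_eq_ediv]
lemma fmod_cast (m : Nat) : PySem.Int.mod (m : Int) 10 = ((m % 10 : Nat) : Int) := by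
  simp [PySem.Int.mod, Int.fmod_eq_emod]

lemma find369Loop_eq :
    ∀ (f m : Nat) (cnt : Int), m ≤ f → find369Loop f (m : Int) cnt = cnt + (g369 m : Int) := by
  intro f
  induction f with
  | zero =>
    intro m cnt h
    have : m = 0 := by omega
    subst this
    rw [find369Loop, g369]
    norm_num
  | succ f ih =>
    intro m cnt h
    rw [find369Loop, fdiv_cast]
    by_cases h10 : m / 10 = 0
    · rw [g369, dif_pos h10]
      simp only [h10, Nat.cast_zero, ne_eq, not_true_eq_false, if_false]
      have hiff : ((m : Int) = 3 ∨ (m : Int) = 6 ∨ (m : Int) = 9) ↔ (m = 3 ∨ m = 6 ∨ m = 9) := by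
        omega
      by_cases hc : m = 3 ∨ m = 6 ∨ m = 9
      · rw [if_pos (hiff.2 hc), if_pos hc]; push_cast; ring
      · rw [if_neg (fun hh => hc (hiff.1 hh)), if_neg hc]; push_cast; ring
    · have hne : ((m / 10 : Nat) : Int) ≠ 0 := by omega
      rw [if_pos hne]
      have hle : m / 10 ≤ f := by omega
      rw [ih (m / 10) _ hle]
      have hg : g369 m = (if m % 10 = 3 ∨ m % 10 = 6 ∨ m % 10 = 9 then 1 else 0) + g369 (m / 10) := by
        conv_lhs => rw [g369]
        rw [dif_neg h10]
      rw [hg, fmod_cast]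
      have hiff : (((m % 10 : Nat) : Int) = 3 ∨ ((m % 10 : Nat) : Int) = 6 ∨ ((m % 10 : Nat) : Int) = 9)
          ↔ (m % 10 = 3 ∨ m % 10 = 6 ∨ m % 10 = 9) := by omega
      by_cases hc : m % 10 = 3 ∨ m % 10 = 6 ∨ m % 10 = 9
      · rw [if_pos (hiff.2 hc), if_pos hc]; push_cast; ring
      · rw [if_neg (fun hh => hc (hiff.1 hh)), if_neg hc]; push_cast; ring

lemma alt_eq_g369 (m : Nat) : find_369_alt (m : Int) = (g369 m : Int) := by
  unfold find_369_alt
  rw [PySem.Int.toList_toStr]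
  unfold PySem.Int.toChars
  rw [if_neg (by omega : ¬ (m : Int) < 0)]
  have : (m : Int).toNat = m := by omega
  rw [this]
  rw [← List.countP_eq_length_filter]
  unfold Nat.toDigits
  rw [countP_toDigitsCore (m + 1) m [] (by omega)]
  simp

-- ===== VERDICT (by name: the statement is the Claim_ definition above) =====
theorem find_369_spec : Claim_equal_find_369 := by
  intro n _ hpre
  have h0 : (0:Int) ≤ n := hpre
  unfold Spec_find_369 find_369
  obtain ⟨m, rfl⟩ : ∃ m : Nat, n = (m : Int) := ⟨n.toNat, by omega⟩
  have habs : ((m : Int)).natAbs = m := Int.natAbs_natCast m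
  rw [habs, find369Loop_eq m m 0 (le_refl _), alt_eq_g369]
  ring
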